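-- pv_equiv track=rewrite | github.com/BirbLanguage/BirbLang-Interpreter | BirbLang_Interpreter.py | safesplit
-- ===== SOURCE A (Python) =====
-- def safesplit(string, character1=None, character2=None, character3=None):
--     temp = ""
--     arr = []
--     for x in string:
--         if x != character1 and x != character2 and x != character3:
--             temp += x
--
--         else:
--             arr.append(temp)
--             if x == character1:
--                 arr.append(character1)
--             elif x == character2:
--                 arr.append(character2)
--             else:
--                 arr.append(character3)
--             temp = ""
--     arr.append(temp)
--
--     return arr
-- ===== SOURCE B (Python) =====
-- def safesplit(string, character1=None, character2=None, character3=None):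
--     delims = {character1, character2, character3}
--     out = []
--     start = 0
--     for i, x in enumerate(string):
--         if x in delims:
--             out.append(string[start:i])
--             out.append(x)
--             start = i + 1
--     out.append(string[start:])
--     return out
-- ===== Notes on version B (the rewrite author's own statement) =====
-- stated objective: idiomatic
-- what changed: Replaces A's character-by-character token accumulator with a single pass over enumerate(string) that records delimiter positions and emits slices string[start:i] between them, with the delimiters collected once into a set.
import Mathlib
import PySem

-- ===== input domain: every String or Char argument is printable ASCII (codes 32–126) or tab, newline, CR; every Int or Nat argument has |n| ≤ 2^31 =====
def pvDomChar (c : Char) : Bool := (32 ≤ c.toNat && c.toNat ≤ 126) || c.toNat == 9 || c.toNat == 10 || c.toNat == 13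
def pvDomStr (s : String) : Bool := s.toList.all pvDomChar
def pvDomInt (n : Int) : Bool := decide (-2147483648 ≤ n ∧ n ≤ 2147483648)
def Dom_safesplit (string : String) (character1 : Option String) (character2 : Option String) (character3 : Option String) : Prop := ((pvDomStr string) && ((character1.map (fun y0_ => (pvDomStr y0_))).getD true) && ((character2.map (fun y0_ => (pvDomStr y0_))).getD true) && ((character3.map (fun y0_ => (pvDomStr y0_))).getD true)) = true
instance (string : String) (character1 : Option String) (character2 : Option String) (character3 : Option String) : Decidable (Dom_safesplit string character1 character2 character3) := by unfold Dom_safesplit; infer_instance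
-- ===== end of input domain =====

-- B replaces A's character-by-character accumulator with one pass over indices that
-- emits slices between delimiter positions (objective: alternative/idiomatic; same cost).

-- ===== PORT A =====
-- A: fold over the characters, accumulating the current token (as its code points;
-- Python's 'temp += x' is string concatenation, exact at the code-point level) and the output list.
def safesplit (string : String) (character1 : Option String) (character2 : Option String) (character3 : Option String) : List String :=
  let r := string.toList.foldl
    (fun (st : List Char × List String) (x : Char) =>
      if some (String.ofList [x]) ≠ character1 ∧ some (String.ofList [x]) ≠ character2 ∧ some (String.ofList [x]) ≠ character3 then
        (st.1 ++ [x], st.2)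
      else
        ([], st.2 ++ [String.ofList st.1,
          if some (String.ofList [x]) = character1 then character1.getD "" else
          if some (String.ofList [x]) = character2 then character2.getD "" else character3.getD ""]))
    ([], [])
  r.2 ++ [String.ofList r.1]

-- ===== PORT B =====
-- B: {character1, character2, character3} as a PySem.Set; one pass over enumerate(string),
-- cutting slices string[start:i] (ported exactly via the code-point list slice).
def safesplit_alt (string : String) (character1 : Option String) (character2 : Option String) (character3 : Option String) : List String :=
  let s := string.toList
  let delims : PySem.Set (Option String) := PySem.Set.ofList [character1, character2, character3]
  let r := (PySem.List.enumerate s 0).foldl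
    (fun (st : Int × List String) (ix : Int × Char) =>
      if PySem.Set.contains delims (some (String.ofList [ix.2])) then
        (ix.1 + 1, st.2 ++ [String.ofList (PySem.List.slice s (some st.1) (some ix.1)), String.ofList [ix.2]])
      else st)
    (0, [])
  r.2 ++ [String.ofList (PySem.List.slice s (some r.1) none)]

-- ===== PRECONDITION & SPEC =====
def Spec_safesplit (string : String) (character1 : Option String) (character2 : Option String) (character3 : Option String) (out : List String) : Prop := out = safesplit_alt string character1 character2 character3
instance (string : String) (character1 : Option String) (character2 : Option String) (character3 : Option String) (out : List String) : Decidable (Spec_safesplit string character1 character2 character3 out) := by unfold Spec_safesplit; infer_instance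

-- ===== CLAIM (what is proved, stated in full; the proofs are below) =====
def Claim_equal_safesplit : Prop := ∀ (string : String) (character1 : Option String) (character2 : Option String) (character3 : Option String), Dom_safesplit string character1 character2 character3 → Spec_safesplit string character1 character2 character3 (safesplit string character1 character2 character3)

-- ===== LEMMAS AND PROOFS =====

-- reference splitter both ports are reduced to
def splitRef (c1 c2 c3 : Option String) : List Char → List Char → List String
  | temp, [] => [String.ofList temp]
  | temp, x :: xs =>
    if some (String.ofList [x]) = c1 ∨ some (String.ofList [x]) = c2 ∨ some (String.ofList [x]) = c3 then
      String.ofList temp :: String.ofList [x] :: splitRef c1 c2 c3 [] xs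
    else splitRef c1 c2 c3 (temp ++ [x]) xs

theorem safesplit_foldA (c1 c2 c3 : Option String) (xs : List Char) :
    ∀ (temp : List Char) (arr : List String),
      (let r := xs.foldl
        (fun (st : List Char × List String) (x : Char) =>
          if some (String.ofList [x]) ≠ c1 ∧ some (String.ofList [x]) ≠ c2 ∧ some (String.ofList [x]) ≠ c3 then
            (st.1 ++ [x], st.2)
          else
            ([], st.2 ++ [String.ofList st.1,
              if some (String.ofList [x]) = c1 then c1.getD "" else
              if some (String.ofList [x]) = c2 then c2.getD "" else c3.getD ""]))
        (temp, arr)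
       r.2 ++ [String.ofList r.1]) = arr ++ splitRef c1 c2 c3 temp xs := by
  induction xs with
  | nil => intro temp arr; simp [splitRef]
  | cons x xs ih =>
    intro temp arr
    simp only [List.foldl_cons]
    by_cases h : some (String.ofList [x]) ≠ c1 ∧ some (String.ofList [x]) ≠ c2 ∧ some (String.ofList [x]) ≠ c3
    · rw [if_pos h]
      have hnd : ¬ (some (String.ofList [x]) = c1 ∨ some (String.ofList [x]) = c2 ∨ some (String.ofList [x]) = c3) := by tauto
      simp only [splitRef, if_neg hnd]
      exact ih (temp ++ [x]) arr
    · rw [if_neg h]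
      have hd : some (String.ofList [x]) = c1 ∨ some (String.ofList [x]) = c2 ∨ some (String.ofList [x]) = c3 := by tauto
      have hm : (if some (String.ofList [x]) = c1 then c1.getD "" else
          if some (String.ofList [x]) = c2 then c2.getD "" else c3.getD "") = String.ofList [x] := by
        rcases hd with h1 | h2 | h3
        · rw [if_pos h1, ← h1]; rfl
        · by_cases h1 : some (String.ofList [x]) = c1
          · rw [if_pos h1, ← h1]; rfl
          · rw [if_neg h1, if_pos h2, ← h2]; rfl
        · by_cases h1 : some (String.ofList [x]) = c1
          · rw [if_pos h1, ← h1]; rfl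
          · by_cases h2 : some (String.ofList [x]) = c2
            · rw [if_neg h1, if_pos h2, ← h2]; rfl
            · rw [if_neg h1, if_neg h2, ← h3]; rfl
      simp only [splitRef, if_pos hd, hm]
      rw [ih [] _]
      simp

theorem safesplit_foldB (c1 c2 c3 : Option String) (s : List Char) :
    ∀ (l : List Char) (k : Nat) (start : Int) (out : List String),
      0 ≤ start → start.toNat ≤ k → s.drop k = l →
      (let r := (PySem.List.enumerate l (k : Int)).foldl
        (fun (st : Int × List String) (ix : Int × Char) =>
          if PySem.Set.contains (PySem.Set.ofList [c1, c2, c3]) (some (String.ofList [ix.2])) then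
            (ix.1 + 1, st.2 ++ [String.ofList (PySem.List.slice s (some st.1) (some ix.1)), String.ofList [ix.2]])
          else st)
        (start, out)
       r.2 ++ [String.ofList (PySem.List.slice s (some r.1) none)])
      = out ++ splitRef c1 c2 c3 ((s.drop start.toNat).take (k - start.toNat)) l := by
  intro l
  induction l with
  | nil =>
    intro k start out h0 hk hdrop
    have hlen : s.length ≤ k := by
      by_contra h
      have := List.drop_eq_nil_iff.mp hdrop
      omega
    have htake : (s.drop start.toNat).take (k - start.toNat) = s.drop start.toNat := by
      apply List.take_of_length_le
      simp; omega
    simp [splitRef, PySem.List.slice_from s h0, htake]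
  | cons x l ih =>
    intro k start out h0 hk hdrop
    have hx : s[k]? = some x := by
      have : (s.drop k)[0]? = some x := by rw [hdrop]; rfl
      simpa using this
    have hdrop' : s.drop (k + 1) = l := by
      rw [← List.drop_drop, hdrop]
      rfl
    rw [PySem.List.enumerate_cons, List.foldl_cons]
    by_cases hd : some (String.ofList [x]) = c1 ∨ some (String.ofList [x]) = c2 ∨ some (String.ofList [x]) = c3
    · have hc : PySem.Set.contains (PySem.Set.ofList [c1, c2, c3]) (some (String.ofList [x])) = true := by
        rw [PySem.Set.contains_iff, PySem.Set.mem_ofList]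
        simpa using hd
      simp only [hc, if_true]
      have hslice : PySem.List.slice s (some start) (some (k : Int)) = (s.drop start.toNat).take (k - start.toNat) := by
        rw [PySem.List.slice_toNat s h0 (by positivity)]
        simp
      have := ih (k + 1) ((k : Int) + 1) (out ++ [String.ofList ((s.drop start.toNat).take (k - start.toNat)), String.ofList [x]])
        (by positivity) (by simp) hdrop'
      simp only [splitRef, if_pos hd]
      rw [show ((k : Int) + 1) = ((k + 1 : Nat) : Int) by push_cast; ring] at this ⊢
      simp only [hslice]
      rw [this]
      simp
    · have hc : PySem.Set.contains (PySem.Set.ofList [c1, c2, c3]) (some (String.ofList [x])) = false := by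
        rw [Bool.eq_false_iff]
        intro hcon
        rw [PySem.Set.contains_iff, PySem.Set.mem_ofList] at hcon
        simp at hcon
        tauto
      simp only [hc, Bool.false_eq_true, if_false]
      have htake : (s.drop start.toNat).take (k + 1 - start.toNat)
          = (s.drop start.toNat).take (k - start.toNat) ++ [x] := by
        have : (s.drop start.toNat)[k - start.toNat]? = some x := by
          rw [List.getElem?_drop]
          rw [show start.toNat + (k - start.toNat) = k by omega]
          exact hx
        rw [show k + 1 - start.toNat = (k - start.toNat) + 1 by omega, List.take_succ, this]
        rfl
      have := ih (k + 1) start out h0 (by omega) hdrop'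
      simp only [splitRef, if_neg hd]
      rw [show ((k : Int) + 1) = ((k + 1 : Nat) : Int) by push_cast; ring]
      rw [this, htake]

-- ===== VERDICT (by name: the statement is the Claim_ definition above) =====
theorem safesplit_spec : Claim_equal_safesplit := by
  intro string c1 c2 c3 _
  show safesplit string c1 c2 c3 = safesplit_alt string c1 c2 c3
  have hA := safesplit_foldA c1 c2 c3 string.toList [] []
  have hB := safesplit_foldB c1 c2 c3 string.toList string.toList 0 0 [] le_rfl (by simp) (by simp)
  simp only [safesplit, safesplit_alt]
  simpa using hA.trans hB.symm
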